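-- pv_equiv track=rewrite | github.com/dashpay/platform | scripts/dash_core_version_switcher.py | parse_inline_table
-- ===== SOURCE A (Python) =====
-- def parse_inline_table(s: str):
--     brace_open = s.find('{')
--     brace_close = s.rfind('}')
--     inner = s[brace_open + 1:brace_close]
--     parts = []
--     buf = []
--     depth = 0
--     for ch in inner:
--         if ch == '[':
--             depth += 1
--         elif ch == ']':
--             depth -= 1
--         if ch == ',' and depth == 0:
--             parts.append(''.join(buf).strip())
--             buf = []
--         else:
--             buf.append(ch)
--     if buf:
--         parts.append(''.join(buf).strip())
--     kv = []
--     for p in parts: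
--         if not p or '=' not in p:
--             continue
--         k, v = p.split('=', 1)
--         kv.append((k.strip(), v.strip()))
--     return kv
-- ===== SOURCE B (Python) =====
-- def parse_inline_table(s: str):
--     # Single scan: key/value buffers and a seen-equals flag replace the
--     # two-phase parts-list build followed by per-part '='-splitting.
--     inner = s[s.find('{') + 1:s.rfind('}')]
--     kv = []
--     key = []
--     val = []
--     seen_eq = False
--     depth = 0
--     for ch in inner:
--         if ch == '[':
--             depth += 1
--         elif ch == ']':
--             depth -= 1
--         if ch == ',' and depth == 0:
--             if seen_eq:
--                 kv.append((''.join(key).strip(), ''.join(val).strip()))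
--             key, val, seen_eq = [], [], False
--         elif not seen_eq and ch == '=':
--             seen_eq = True
--         elif seen_eq:
--             val.append(ch)
--         else:
--             key.append(ch)
--     if seen_eq:
--         kv.append((''.join(key).strip(), ''.join(val).strip()))
--     return kv
-- ===== Notes on version B (the rewrite author's own statement) =====
-- stated objective: alternative
-- what changed: Replaces A's two-phase pipeline (accumulate comma-separated parts into a list, then a second loop splitting each part on its first '=') with a single scan that keeps separate key/value buffers and a seen-equals flag, emitting each pair directly at a top-level comma and at the end; the parts list and the second loop disappear.
import Mathlib
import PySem

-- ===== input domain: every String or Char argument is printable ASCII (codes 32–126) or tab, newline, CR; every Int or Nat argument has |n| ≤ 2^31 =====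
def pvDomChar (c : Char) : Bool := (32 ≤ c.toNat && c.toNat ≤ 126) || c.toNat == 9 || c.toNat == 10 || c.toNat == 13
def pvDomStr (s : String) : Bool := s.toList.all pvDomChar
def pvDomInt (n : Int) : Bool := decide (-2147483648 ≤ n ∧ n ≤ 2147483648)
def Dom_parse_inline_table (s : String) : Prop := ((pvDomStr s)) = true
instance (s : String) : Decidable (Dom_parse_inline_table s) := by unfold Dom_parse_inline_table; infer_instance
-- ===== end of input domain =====

-- B replaces A's two-phase parse (collect comma-separated parts, then split each on its
-- first '=') with a single scan keeping key/value buffers and a seen-equals flag (objective: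
-- alternative decomposition, same cost).

-- ===== PORT A =====
-- loop body of A's first for-loop; state = (parts, buf, depth)
def pvAStep (st : List (List Char) × List Char × Int) (ch : Char) :
    List (List Char) × List Char × Int :=
  let depth := if ch = '[' then st.2.2 + 1 else if ch = ']' then st.2.2 - 1 else st.2.2
  if ch = ',' ∧ depth = 0 then (st.1 ++ [PySem.Chars.strip st.2.1], [], depth)
  else (st.1, st.2.1 ++ [ch], depth)

-- body of A's second for-loop; p.split('=', 1) is PySem.Chars.splitOnMax p ['='] 1
def pvAKV (kv : List (String × String)) (p : List Char) : List (String × String) :=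
  if p.isEmpty ∨ PySem.Chars.isIn ['='] p = false then kv
  else
    match PySem.Chars.splitOnMax p ['='] 1 with
    | [k, v] => kv ++ [(String.ofList (PySem.Chars.strip k), String.ofList (PySem.Chars.strip v))]
    | _ => kv   -- unreachable: split('=', 1) with '=' ∈ p yields exactly two pieces

-- A's tail: the 'if buf' append followed by the kv loop
def pvAFinish (st : List (List Char) × List Char × Int) : List (String × String) :=
  (if st.2.1.isEmpty then st.1 else st.1 ++ [PySem.Chars.strip st.2.1]).foldl pvAKV []

def parse_inline_table (s : String) : List (String × String) :=
  let brace_open := PySem.Str.find s "{"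
  let brace_close := PySem.Str.rfind s "}"
  let inner := PySem.List.slice s.toList (some (brace_open + 1)) (some brace_close)
  pvAFinish (inner.foldl pvAStep ([], [], 0))

-- ===== PORT B =====
def pvBFlush (kv : List (String × String)) (key val : List Char) (seen : Bool) :
    List (String × String) :=
  if seen then
    kv ++ [(String.ofList (PySem.Chars.strip key), String.ofList (PySem.Chars.strip val))]
  else kv

-- loop body of B's single scan; state = (kv, key, val, seen_eq, depth)
def pvBStep (st : List (String × String) × List Char × List Char × Bool × Int) (ch : Char) :
    List (String × String) × List Char × List Char × Bool × Int :=
  let (kv, key, val, seen, depth) := st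
  let depth := if ch = '[' then depth + 1 else if ch = ']' then depth - 1 else depth
  if ch = ',' ∧ depth = 0 then (pvBFlush kv key val seen, [], [], false, depth)
  else if seen = false ∧ ch = '=' then (kv, key, val, true, depth)
  else if seen then (kv, key, val ++ [ch], seen, depth)
  else (kv, key ++ [ch], val, seen, depth)

def pvBFinish (st : List (String × String) × List Char × List Char × Bool × Int) :
    List (String × String) :=
  pvBFlush st.1 st.2.1 st.2.2.1 st.2.2.2.1

def parse_inline_table_alt (s : String) : List (String × String) :=
  let inner := PySem.List.slice s.toList
    (some (PySem.Str.find s "{" + 1)) (some (PySem.Str.rfind s "}"))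
  pvBFinish (inner.foldl pvBStep ([], [], [], false, 0))

-- ===== PRECONDITION & SPEC =====
def Spec_parse_inline_table (s : String) (out : List (String × String)) : Prop := out = parse_inline_table_alt s
instance (s : String) (out : List (String × String)) : Decidable (Spec_parse_inline_table s out) := by unfold Spec_parse_inline_table; infer_instance

-- ===== CLAIM (what is proved, stated in full; the proofs are below) =====
def Claim_equal_parse_inline_table : Prop := ∀ (s : String), Dom_parse_inline_table s → Spec_parse_inline_table s (parse_inline_table s)

-- ===== LEMMAS AND PROOFS =====

-- relation between A's single buffer and B's key/val/seen state
def pvInv (buf key val : List Char) (seen : Bool) : Prop :=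
  match seen with
  | true => buf = key ++ '=' :: val ∧ '=' ∉ key
  | false => buf = key ∧ val = [] ∧ '=' ∉ key

lemma pv_dropWhile_idem {α : Type} (p : α → Bool) (l : List α) :
    (l.dropWhile p).dropWhile p = l.dropWhile p := by
  cases h : l.dropWhile p with
  | nil => rfl
  | cons c t =>
    have hne : l.dropWhile p ≠ [] := by simp [h]
    have hc := List.head_dropWhile_not p hne
    simp only [h, List.head_cons] at hc
    simp [List.dropWhile_cons, hc]

lemma pv_lstrip_append_cons (a b : List Char) (c : Char) (hc : PySem.Chars.isspace c = false) :
    PySem.Chars.lstrip (a ++ c :: b) = PySem.Chars.lstrip a ++ c :: b := by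
  simp only [PySem.Chars.lstrip, List.dropWhile_append]
  split_ifs with h
  · simp_all [List.isEmpty_iff, List.dropWhile_cons, hc]
  · rfl

lemma pv_rstrip_append_cons (a b : List Char) (c : Char) (hc : PySem.Chars.isspace c = false) :
    PySem.Chars.rstrip (a ++ c :: b) = a ++ c :: PySem.Chars.rstrip b := by
  simp only [PySem.Chars.rstrip, List.reverse_append, List.reverse_cons]
  simp only [List.dropWhile_append]
  split_ifs <;> simp_all [List.isEmpty_iff, List.dropWhile_cons, hc]

lemma pv_strip_append_eq (key val : List Char) :
    PySem.Chars.strip (key ++ '=' :: val)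
      = PySem.Chars.lstrip key ++ '=' :: PySem.Chars.rstrip val := by
  simp only [PySem.Chars.strip]
  rw [pv_lstrip_append_cons _ _ _ (by decide), pv_rstrip_append_cons _ _ _ (by decide)]

lemma pv_strip_lstrip (x : List Char) :
    PySem.Chars.strip (PySem.Chars.lstrip x) = PySem.Chars.strip x := by
  simp only [PySem.Chars.strip, PySem.Chars.lstrip, pv_dropWhile_idem]

lemma pv_rstrip_cons (c : Char) (t : List Char) :
    PySem.Chars.rstrip (c :: t)
      = if PySem.Chars.rstrip t = [] then (if PySem.Chars.isspace c then [] else [c])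
        else c :: PySem.Chars.rstrip t := by
  simp only [PySem.Chars.rstrip, List.reverse_cons, List.dropWhile_append]
  by_cases h : List.dropWhile PySem.Chars.isspace t.reverse = []
  · by_cases hc : PySem.Chars.isspace c <;>
      simp [h, hc, List.dropWhile_cons]
  · simp [h, List.isEmpty_iff]

lemma pv_lstrip_rstrip_comm (x : List Char) :
    PySem.Chars.lstrip (PySem.Chars.rstrip x) = PySem.Chars.rstrip (PySem.Chars.lstrip x) := by
  induction x with
  | nil => rfl
  | cons c t ih =>
    by_cases hc : PySem.Chars.isspace c = true
    · rw [pv_rstrip_cons]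
      have hl : PySem.Chars.lstrip (c :: t) = PySem.Chars.lstrip t := by
        simp [PySem.Chars.lstrip, List.dropWhile_cons, hc]
      rw [hl, ← ih]
      split_ifs with h1
      · simp [h1, hc, PySem.Chars.lstrip]
      · simp [PySem.Chars.lstrip, List.dropWhile_cons, hc]
    · have hc' : PySem.Chars.isspace c = false := by simpa using hc
      have hl : PySem.Chars.lstrip (c :: t) = c :: t := by
        simp [PySem.Chars.lstrip, List.dropWhile_cons, hc']
      rw [hl, pv_rstrip_cons]
      split_ifs with h1
      · simp [hc', PySem.Chars.lstrip, List.dropWhile_cons]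
      · simp [PySem.Chars.lstrip, List.dropWhile_cons, hc']

lemma pv_strip_rstrip (x : List Char) :
    PySem.Chars.strip (PySem.Chars.rstrip x) = PySem.Chars.strip x := by
  simp only [PySem.Chars.strip]
  rw [pv_lstrip_rstrip_comm]
  simp only [PySem.Chars.rstrip, List.reverse_reverse, pv_dropWhile_idem]

lemma pv_mem_lstrip {x : List Char} {c : Char} (h : c ∈ PySem.Chars.lstrip x) : c ∈ x :=
  (List.dropWhile_sublist _).mem h

lemma pv_mem_strip {x : List Char} {c : Char} (h : c ∈ PySem.Chars.strip x) : c ∈ x := by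
  apply pv_mem_lstrip
  simp only [PySem.Chars.strip, PySem.Chars.rstrip] at h
  have := (List.dropWhile_sublist (l := (PySem.Chars.lstrip x).reverse)
    (p := PySem.Chars.isspace)).mem (by simpa using h)
  simpa using this

lemma pv_takeWhile_append (a b : List Char) (ha : '=' ∉ a) :
    (a ++ '=' :: b).takeWhile (fun x => decide ¬(x = '=')) = a := by
  induction a with
  | nil => simp
  | cons c t ih =>
    have hc : c ≠ '=' := by intro h; exact ha (by simp [h])
    simp only [List.cons_append, List.takeWhile_cons, hc, decide_true, not_false_iff,
      decide_not]
    simp only [List.mem_cons, not_or] at ha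
    simpa [hc] using ih ha.2

lemma pv_dropWhile_append (a b : List Char) (ha : '=' ∉ a) :
    (a ++ '=' :: b).dropWhile (fun x => decide ¬(x = '=')) = '=' :: b := by
  induction a with
  | nil => simp
  | cons c t ih =>
    have hc : c ≠ '=' := by intro h; exact ha (by simp [h])
    simp only [List.mem_cons, not_or] at ha
    simpa [List.dropWhile_cons, hc] using ih ha.2

lemma pv_go_zero (fuel : Nat) (l cur : List Char) (acc : List (List Char)) :
    PySem.Chars.splitOnMax.go ['='] fuel 0 l cur acc = ((cur.reverse ++ l) :: acc).reverse := by
  cases fuel with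
  | zero => rw [PySem.Chars.splitOnMax.go]
  | succ f => cases l with
    | nil => rw [PySem.Chars.splitOnMax.go]; simp; omega
    | cons c t => rw [PySem.Chars.splitOnMax.go]; simp

lemma pv_go_one (l : List Char) : ∀ (fuel : Nat) (cur : List Char) (acc : List (List Char)),
    l.length < fuel → '=' ∈ l →
    PySem.Chars.splitOnMax.go ['='] fuel 1 l cur acc
      = acc.reverse ++ [cur.reverse ++ l.takeWhile (fun x => decide ¬(x = '=')),
                        (l.dropWhile (fun x => decide ¬(x = '='))).tail] := by
  induction l with
  | nil => intro fuel cur acc _ hm; simp at hm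
  | cons c t ih =>
    intro fuel cur acc hf hm
    cases fuel with
    | zero => omega
    | succ f =>
      rw [PySem.Chars.splitOnMax.go]
      by_cases hc : c = '='
      · subst hc
        have hpre : (List.isPrefixOf ['='] ('=' :: t)) = true := by
          rw [List.isPrefixOf_iff_prefix]; exact ⟨t, rfl⟩
        simp only [if_neg (by omega : ¬(1 : Nat) = 0), hpre, if_true]
        simp [pv_go_zero, List.takeWhile_cons, List.dropWhile_cons]
      · have hpre : (List.isPrefixOf ['='] (c :: t)) = false := by
          rw [Bool.eq_false_iff]
          intro hp
          rw [List.isPrefixOf_iff_prefix] at hp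
          exact hc (List.cons_prefix_cons.mp hp).1.symm
        simp only [if_neg (by omega : ¬(1 : Nat) = 0), hpre, if_false]
        have hmt : '=' ∈ t := by
          rcases List.mem_cons.mp hm with h | h
          · exact absurd h.symm hc
          · exact h
        rw [ih f (c :: cur) acc (by simpa using Nat.lt_of_succ_lt_succ hf) hmt]
        simp [List.takeWhile_cons, List.dropWhile_cons, hc]

lemma pv_splitOnMax_eq (p : List Char) (h : '=' ∈ p) :
    PySem.Chars.splitOnMax p ['='] 1
      = [p.takeWhile (fun x => decide ¬(x = '=')),
         (p.dropWhile (fun x => decide ¬(x = '='))).tail] := by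
  rw [PySem.Chars.splitOnMax]
  rw [if_neg (by omega : ¬(1:Int) < 0)]
  rw [show Int.toNat 1 = 1 from rfl]
  rw [pv_go_one p (p.length + 1) [] [] (by omega) h]
  simp

lemma pv_isIn_eq_iff (p : List Char) : PySem.Chars.isIn ['='] p = true ↔ '=' ∈ p := by
  rw [PySem.Chars.isIn_iff_infix]; exact List.singleton_infix_iff '=' p

-- pvAKV applied to a just-stripped buffer equals B's flush, under the buffer invariant
lemma pv_kv_flush (kv : List (String × String)) (buf key val : List Char) (seen : Bool)
    (hInv : pvInv buf key val seen) :
    pvAKV kv (PySem.Chars.strip buf) = pvBFlush kv key val seen := by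
  cases seen with
  | false =>
    simp only [pvInv] at hInv
    obtain ⟨hbuf, _, hkey⟩ := hInv
    subst hbuf
    have hIn : PySem.Chars.isIn ['='] (PySem.Chars.strip buf) = false := by
      rw [Bool.eq_false_iff]
      intro h
      exact hkey (pv_mem_strip ((pv_isIn_eq_iff _).mp h))
    simp [pvAKV, pvBFlush, hIn]
  | true =>
    simp only [pvInv] at hInv
    obtain ⟨hbuf, hkey⟩ := hInv
    subst hbuf
    rw [pv_strip_append_eq]
    have hkey' : '=' ∉ PySem.Chars.lstrip key := fun h => hkey (pv_mem_lstrip h)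
    have hmem : '=' ∈ PySem.Chars.lstrip key ++ '=' :: PySem.Chars.rstrip val := by simp
    have hIn : PySem.Chars.isIn ['='] (PySem.Chars.lstrip key ++ '=' :: PySem.Chars.rstrip val) = true :=
      (pv_isIn_eq_iff _).mpr hmem
    have hne : (PySem.Chars.lstrip key ++ '=' :: PySem.Chars.rstrip val).isEmpty = false := by
      simp [List.isEmpty_iff]
    rw [pvAKV]
    rw [if_neg (by simp [hne, hIn])]
    rw [pv_splitOnMax_eq _ hmem]
    rw [pv_takeWhile_append _ _ hkey', pv_dropWhile_append _ _ hkey']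
    simp only [List.tail_cons]
    rw [pv_strip_lstrip, pv_strip_rstrip]
    simp [pvBFlush]

-- A's final 'if buf: append' + kv loop equals B's final flush
lemma pv_finish_eq (parts : List (List Char)) (buf key val : List Char) (seen : Bool)
    (hInv : pvInv buf key val seen) :
    (if buf.isEmpty then parts else parts ++ [PySem.Chars.strip buf]).foldl pvAKV []
      = pvBFlush (parts.foldl pvAKV []) key val seen := by
  by_cases hb : buf = []
  · subst hb
    cases seen with
    | false => simp [pvBFlush]
    | true =>
      simp only [pvInv] at hInv
      obtain ⟨hbuf, _⟩ := hInv; simp at hbuf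
  · rw [if_neg (by simpa [List.isEmpty_iff] using hb)]
    rw [List.foldl_append]
    simp only [List.foldl_cons, List.foldl_nil]
    exact pv_kv_flush _ _ _ _ _ hInv

lemma pv_loop (l : List Char) :
    ∀ (parts : List (List Char)) (buf key val : List Char) (seen : Bool)
      (kv : List (String × String)) (depth : Int),
    pvInv buf key val seen → kv = parts.foldl pvAKV [] →
    pvAFinish (l.foldl pvAStep (parts, buf, depth))
      = pvBFinish (l.foldl pvBStep (kv, key, val, seen, depth)) := by
  induction l with
  | nil =>
    intro parts buf key val seen kv depth hInv hkv
    simp only [List.foldl_nil, pvAFinish, pvBFinish, hkv]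
    exact pv_finish_eq parts buf key val seen hInv
  | cons ch t ih =>
    intro parts buf key val seen kv depth hInv hkv
    simp only [List.foldl_cons]
    set d := if ch = '[' then depth + 1 else if ch = ']' then depth - 1 else depth with hd
    by_cases hcomma : ch = ',' ∧ d = 0
    · have hA : pvAStep (parts, buf, depth) ch = (parts ++ [PySem.Chars.strip buf], [], d) := by
        simp only [pvAStep, ← hd]; rw [if_pos hcomma]
      have hB : pvBStep (kv, key, val, seen, depth) ch
          = (pvBFlush kv key val seen, [], [], false, d) := by
        simp only [pvBStep, ← hd]; rw [if_pos hcomma]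
      rw [hA, hB]
      apply ih
      · simp [pvInv]
      · rw [List.foldl_append, hkv]
        simp only [List.foldl_cons, List.foldl_nil]
        exact (pv_kv_flush _ _ _ _ _ hInv).symm
    · have hA : pvAStep (parts, buf, depth) ch = (parts, buf ++ [ch], d) := by
        simp only [pvAStep, ← hd]; rw [if_neg hcomma]
      rw [hA]
      by_cases heq : seen = false ∧ ch = '='
      · obtain ⟨hseen, hch⟩ := heq
        subst hseen; subst hch
        have hB : pvBStep (kv, key, val, false, depth) '='
            = (kv, key, val, true, d) := by
          simp only [pvBStep, ← hd]; rw [if_neg hcomma]; simp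
        rw [hB]
        simp only [pvInv] at hInv
        obtain ⟨hbuf, hval, hkey⟩ := hInv
        subst hbuf; subst hval
        exact ih parts (buf ++ ['=']) buf [] true kv d ⟨rfl, hkey⟩ hkv
      · cases seen with
        | true =>
          have hB : pvBStep (kv, key, val, true, depth) ch
              = (kv, key, val ++ [ch], true, d) := by
            simp only [pvBStep, ← hd]; rw [if_neg hcomma]; simp
          rw [hB]
          simp only [pvInv] at hInv
          obtain ⟨hbuf, hkey⟩ := hInv
          subst hbuf
          exact ih parts (key ++ '=' :: val ++ [ch]) key (val ++ [ch]) true kv d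
            ⟨by simp, hkey⟩ hkv
        | false =>
          have hch : ch ≠ '=' := by
            intro h; exact heq ⟨rfl, h⟩
          have hB : pvBStep (kv, key, val, false, depth) ch
              = (kv, key ++ [ch], val, false, d) := by
            simp only [pvBStep, ← hd]; rw [if_neg hcomma]; rw [if_neg (by simp [hch])]; simp
          rw [hB]
          simp only [pvInv] at hInv
          obtain ⟨hbuf, hval, hkey⟩ := hInv
          subst hbuf; subst hval
          have hkey' : '=' ∉ buf ++ [ch] := by
            intro h
            rcases List.mem_append.mp h with h | h
            · exact hkey h
            · exact hch (List.mem_singleton.mp h).symm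
          exact ih parts (buf ++ [ch]) (buf ++ [ch]) [] false kv d ⟨rfl, rfl, hkey'⟩ hkv

-- ===== VERDICT (by name: the statement is the Claim_ definition above) =====
theorem parse_inline_table_spec : Claim_equal_parse_inline_table := by
  intro s _
  unfold Spec_parse_inline_table parse_inline_table parse_inline_table_alt
  exact pv_loop _ [] [] [] [] false [] 0 (by simp [pvInv]) rfl
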